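-- pv_equiv track=rewrite | github.com/joyaseem01/money | probability.py | check_even_odd_zero
-- ===== SOURCE A (Python) =====
-- def check_even_odd_zero(list_result):
--    times = 0
--    conservative = 0
--    zero = 0
--    even =0
--    odd=0
--    """
--    Check if the given number is even, odd, or zero.
--    """
--    for i in list_result:
--       if i == 0:
--          zero = zero+ 1
--          conservative = conservative +1
--       elif i % 2 == 0:
--          even = even + 1
--          conservative = 0
--       elif i % 2 != 0:
--          odd = odd + 1
--          conservative = conservative + 1
--       if conservative == 4:
--          times = times +1
--          conservative = 0
--
--    return times,even,odd,zero
-- ===== SOURCE B (Python) =====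
-- def check_even_odd_zero(list_result):
--     zero = sum(1 for i in list_result if i == 0)
--     even = sum(1 for i in list_result if i != 0 and i % 2 == 0)
--     odd = len(list_result) - zero - even
--     times = 0
--     run = 0
--     for i in list_result:
--         if i == 0 or i % 2 != 0:
--             run += 1
--         else:
--             times += run // 4
--             run = 0
--     times += run // 4
--     return times, even, odd, zero
-- ===== Notes on version B (the rewrite author's own statement) =====
-- stated objective: simpler
-- what changed: Replaced the single five-counter loop with mod-4 sentinel resets by direct classification counts (zero/even, odd by subtraction) plus run-segmentation: times is the sum of floor(L/4) over maximal runs of zeros/odds.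
import Mathlib
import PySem

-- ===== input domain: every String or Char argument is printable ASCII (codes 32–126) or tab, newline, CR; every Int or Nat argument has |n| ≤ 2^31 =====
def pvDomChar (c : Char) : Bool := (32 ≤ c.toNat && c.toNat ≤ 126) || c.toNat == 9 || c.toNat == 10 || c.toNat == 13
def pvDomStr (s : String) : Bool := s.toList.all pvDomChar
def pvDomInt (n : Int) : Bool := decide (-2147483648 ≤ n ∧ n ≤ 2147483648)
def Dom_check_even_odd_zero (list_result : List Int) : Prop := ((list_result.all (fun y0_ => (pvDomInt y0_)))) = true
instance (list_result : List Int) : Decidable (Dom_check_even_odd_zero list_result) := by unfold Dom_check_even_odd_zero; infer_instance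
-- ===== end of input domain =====

-- B classifies elements directly (zero/even counts, odd by subtraction) and sums floor(runLength/4)
-- over maximal runs of zeros/odds, replacing A's mod-4 sentinel counter; objective: simpler.

-- ===== PORT A =====
-- loop body of A: state (times, conservative, zero, even, odd)
def pvStepA (st : Int × Int × Int × Int × Int) (i : Int) : Int × Int × Int × Int × Int :=
  let st2 :=
    if i == 0 then (st.1, st.2.1 + 1, st.2.2.1 + 1, st.2.2.2.1, st.2.2.2.2)
    else if PySem.Int.mod i 2 == 0 then (st.1, (0:Int), st.2.2.1, st.2.2.2.1 + 1, st.2.2.2.2)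
    else (st.1, st.2.1 + 1, st.2.2.1, st.2.2.2.1, st.2.2.2.2 + 1)
  if st2.2.1 == 4 then (st2.1 + 1, 0, st2.2.2) else st2

def check_even_odd_zero (list_result : List Int) : Int × Int × Int × Int :=
  let s := list_result.foldl pvStepA (0, 0, 0, 0, 0)
  (s.1, s.2.2.2.1, s.2.2.2.2, s.2.2.1)

-- ===== PORT B =====
-- loop body of B's `times` pass: state (times, run)
def pvStepB (tr : Int × Int) (i : Int) : Int × Int :=
  if i == 0 || PySem.Int.mod i 2 != 0 then (tr.1, tr.2 + 1)
  else (tr.1 + PySem.Int.floordiv tr.2 4, 0)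

def check_even_odd_zero_alt (list_result : List Int) : Int × Int × Int × Int :=
  let zero : Int := ((list_result.filter (fun i => i == 0)).length : Int)
  let even : Int := ((list_result.filter (fun i => i != 0 && PySem.Int.mod i 2 == 0)).length : Int)
  let odd : Int := (list_result.length : Int) - zero - even
  let tr := list_result.foldl pvStepB (0, 0)
  (tr.1 + PySem.Int.floordiv tr.2 4, even, odd, zero)

-- ===== PRECONDITION & SPEC =====
def Spec_check_even_odd_zero (list_result : List Int) (out : Int × Int × Int × Int) : Prop := out = check_even_odd_zero_alt list_result
instance (list_result : List Int) (out : Int × Int × Int × Int) : Decidable (Spec_check_even_odd_zero list_result out) := by unfold Spec_check_even_odd_zero; infer_instance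

-- ===== CLAIM (what is proved, stated in full; the proofs are below) =====
def Claim_equal_check_even_odd_zero : Prop := ∀ (list_result : List Int), Dom_check_even_odd_zero list_result → Spec_check_even_odd_zero list_result (check_even_odd_zero list_result)

-- ===== LEMMAS AND PROOFS =====

lemma pv_fd4 (a : Int) : PySem.Int.floordiv a 4 = a / 4 := PySem.Int.floordiv_eq_ediv_of_pos (by norm_num)
lemma pv_md2 (a : Int) : PySem.Int.mod a 2 = a % 2 := PySem.Int.mod_eq_emod_of_pos (by norm_num)

-- the three classes (zero / non-zero even / odd) partition the list
lemma pv_partition : ∀ (l : List Int),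
    (((l.filter (fun i => !(i == 0) && !(i % 2 == 0))).length : Int))
      = (l.length : Int) - ((l.filter (fun i => i == 0)).length : Int)
        - ((l.filter (fun i => i != 0 && i % 2 == 0)).length : Int) := by
  intro l
  induction l with
  | nil => simp
  | cons i t ih =>
    by_cases h0 : i = 0
    · simp [h0]; omega
    · by_cases hd : i % 2 = 0 <;> simp [h0, hd] <;> omega

-- invariant: A's (times, conservative) state is (tb + run/4, run % 4) where (tb, run) is B's
-- run-segmentation state, and A's three counters accumulate B's filter counts.
lemma pv_main : ∀ (l : List Int) (tb run z e o : Int), 0 ≤ run →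
    l.foldl pvStepA (tb + run / 4, run % 4, z, e, o)
      = ((l.foldl pvStepB (tb, run)).1 + (l.foldl pvStepB (tb, run)).2 / 4,
         (l.foldl pvStepB (tb, run)).2 % 4,
         z + ((l.filter (fun i => i == 0)).length : Int),
         e + ((l.filter (fun i => i != 0 && i % 2 == 0)).length : Int),
         o + ((l.filter (fun i => !(i == 0) && !(i % 2 == 0))).length : Int)) := by
  intro l
  induction l with
  | nil => intro tb run z e o _; simp [List.foldl]
  | cons i t ih =>
    intro tb run z e o hrun
    simp only [List.foldl_cons]
    by_cases h0 : i = 0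
    · have hB : pvStepB (tb, run) i = (tb, run + 1) := by simp [pvStepB, h0]
      have hA : pvStepA (tb + run / 4, run % 4, z, e, o) i
          = (tb + (run + 1) / 4, (run + 1) % 4, z + 1, e, o) := by
        simp [pvStepA, h0]
        split_ifs with h4 <;> simp [Prod.ext_iff] <;> omega
      rw [hA, hB, ih tb (run + 1) (z + 1) e o (by omega)]
      simp [h0, Prod.ext_iff]; omega
    · by_cases hd : i % 2 = 0
      · have hB : pvStepB (tb, run) i = (tb + run / 4, 0) := by
          simp [pvStepB, h0, hd]
        have hA : pvStepA (tb + run / 4, run % 4, z, e, o) i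
            = (tb + run / 4, 0, z, e + 1, o) := by
          simp [pvStepA, h0, hd]
        have ih' := ih (tb + run / 4) 0 z (e + 1) o (by omega)
        norm_num at ih'
        rw [hA, hB, ih']
        simp [h0, hd, Prod.ext_iff]; omega
      · have hB : pvStepB (tb, run) i = (tb, run + 1) := by
          simp [pvStepB, h0, hd]
        have hA : pvStepA (tb + run / 4, run % 4, z, e, o) i
            = (tb + (run + 1) / 4, (run + 1) % 4, z, e, o + 1) := by
          simp [pvStepA, h0, hd]
          split_ifs with h4 <;> simp [Prod.ext_iff] <;> omega
        rw [hA, hB, ih tb (run + 1) z e (o + 1) (by omega)]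
        simp [h0, hd, Prod.ext_iff]; omega

-- ===== VERDICT (by name: the statement is the Claim_ definition above) =====
theorem check_even_odd_zero_spec : Claim_equal_check_even_odd_zero := by
  intro l _
  unfold Spec_check_even_odd_zero check_even_odd_zero check_even_odd_zero_alt
  have h := pv_main l 0 0 0 0 0 le_rfl
  norm_num at h
  simp only [pv_fd4, pv_md2]
  rw [h]
  simp [Prod.ext_iff]
  have hp := pv_partition l
  push_cast at hp ⊢
  omega
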